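-- pv_equiv track=rewrite | github.com/miliar/Code_Jam_Webscraper | solutions_python/solutions_year16_round4_nr1/65.py | build
-- ===== SOURCE A (Python) =====
-- beats = {'R': 'S', 'P': 'R', 'S': 'P'}
--
-- def build(winner, n):
--     current = winner
--     results = []
--     for _ in range(n):
--         results.append(current)
--         newCurrent = ''
--         for player in current:
--             newCurrent += player + beats[player]
--         current = newCurrent
--     results.append(current)
--     return results
-- ===== SOURCE B (Python) =====
-- # Direct positional computation of each stage: stage i (i >= 1) is built by a
-- # bit-count formula per output position instead of repeatedly doubling strings.
-- def build(winner, n):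
--     order = 'RSP'                     # beats cycle: R -> S -> P -> R
--     idx = {'R': 0, 'S': 1, 'P': 2}
--     out = [winner]
--     for i in range(1, max(n, 0) + 1):
--         out.append(''.join(order[(idx[c] + bin(j).count('1')) % 3]
--                            for c in winner
--                            for j in range(1 << i)))
--     return out
-- ===== Notes on version B (the rewrite author's own statement) =====
-- stated objective: alternative
-- what changed: A builds each stage by doubling the previous string character by character; B computes every stage directly from the original winner string with a positional bit-count formula (character m of stage i is winner's character shifted along the R->S->P cycle by the popcount of the low i bits of m), so no stage depends on the previous one.
import Mathlib
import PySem

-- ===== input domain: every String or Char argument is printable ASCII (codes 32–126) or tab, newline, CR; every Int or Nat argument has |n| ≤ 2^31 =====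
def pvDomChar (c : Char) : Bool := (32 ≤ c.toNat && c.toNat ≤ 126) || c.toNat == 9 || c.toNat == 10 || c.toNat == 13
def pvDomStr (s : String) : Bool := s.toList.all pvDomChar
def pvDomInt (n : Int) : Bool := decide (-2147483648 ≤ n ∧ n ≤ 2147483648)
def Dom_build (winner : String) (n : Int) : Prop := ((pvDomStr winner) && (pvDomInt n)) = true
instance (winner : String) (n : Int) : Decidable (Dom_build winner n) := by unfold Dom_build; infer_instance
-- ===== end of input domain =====

-- B repeatedly doubles nothing: each stage i >= 1 is computed directly, character by
-- character, from the winner and a popcount formula; A doubles the string stage by stage.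
-- Both Pythons raise KeyError when n >= 1 and winner has a character outside R/P/S;
-- exactly those inputs are excluded by Pre_build.

-- ===== PORT A =====
-- beats = {'R': 'S', 'P': 'R', 'S': 'P'}
def pvBeats : PySem.Dict Char Char := PySem.Dict.ofList [('R', 'S'), ('P', 'R'), ('S', 'P')]

-- inner loop: for player in current: newCurrent += player + beats[player]
-- (beats[player] = none is Python's KeyError; threaded as Option, excluded by Pre_build)
def pvDoubleA (current : List Char) : Option (List Char) :=
  current.foldl
    (fun acc player => acc.bind fun nc => (pvBeats.get? player).bind fun b =>
      some (nc ++ [player, b]))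
    (some [])

-- outer loop: for _ in range(n): results.append(current); current = doubled current
def pvLoopA : Nat → List Char × List (List Char) → Option (List Char × List (List Char))
  | 0, st => some st
  | k + 1, (current, results) =>
      (pvDoubleA current).bind fun nc => pvLoopA k (nc, results ++ [current])

def build (winner : String) (n : Int) : List String :=
  match pvLoopA n.toNat (winner.toList, []) with
  | some (current, results) => (results ++ [current]).map String.ofList
  | none => []  -- Python raises KeyError here; excluded by Pre_build

-- ===== PORT B =====
-- order = 'RSP'; idx = {'R': 0, 'S': 1, 'P': 2}
def pvOrder : List Char := ['R', 'S', 'P']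
def pvIdx : PySem.Dict Char Int := PySem.Dict.ofList [('R', 0), ('S', 1), ('P', 2)]

-- ''.join(order[(idx[c] + bin(j).count('1')) % 3] for c in winner for j in range(1 << i))
-- (idx[c] = none is Python's KeyError; order[...] index is always in 0..2, so pyGetD is exact)
def pvStageB (winner : List Char) (i : Int) : Option (List Char) :=
  winner.foldl
    (fun acc c => acc.bind fun out => (pvIdx.get? c).bind fun k =>
      some (out ++ (PySem.List.pyRange 0 ((1 : Int) <<< i.toNat) 1).map
        (fun j => PySem.List.pyGetD pvOrder (PySem.Int.mod (k + (PySem.Int.bitCount j : Int)) 3) 'R')))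
    (some [])

-- out = [winner]; for i in range(1, max(n, 0) + 1): out.append(stage i)
def build_alt (winner : String) (n : Int) : List String :=
  match (PySem.List.pyRange 1 (max n 0 + 1) 1).foldl
      (fun acc i => acc.bind fun out => (pvStageB winner.toList i).bind fun s =>
        some (out ++ [s]))
      (some [winner.toList]) with
  | some stages => stages.map String.ofList
  | none => []  -- Python raises KeyError here; excluded by Pre_build

-- ===== PRECONDITION & SPEC =====
-- Pre_build excludes exactly the inputs on which A raises KeyError: n >= 1 together with a
-- character of winner outside {'R', 'P', 'S'} (B raises the same KeyError there).
def Pre_build (winner : String) (n : Int) : Prop :=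
  n ≤ 0 ∨ winner.toList.all (fun c => c == 'R' || c == 'P' || c == 'S') = true
instance (winner : String) (n : Int) : Decidable (Pre_build winner n) := by
  unfold Pre_build; infer_instance

def pvWitness_build : String × Int := ("RPS", 2)

def Spec_build (winner : String) (n : Int) (out : List String) : Prop := out = build_alt winner n
instance (winner : String) (n : Int) (out : List String) : Decidable (Spec_build winner n out) := by
  unfold Spec_build; infer_instance

-- ===== CLAIM (what is proved, stated in full; the proofs are below) =====
def Claim_equal_build : Prop := ∀ (winner : String) (n : Int), Dom_build winner n → Pre_build winner n → Spec_build winner n (build winner n)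

-- ===== LEMMAS AND PROOFS =====

-- proof-side total versions of the beats/idx lookups (only the R/P/S cases matter)
def pvBeatsFn (c : Char) : Char := if c = 'R' then 'S' else if c = 'P' then 'R' else 'P'
def pvRPS (c : Char) : Prop := c = 'R' ∨ c = 'P' ∨ c = 'S'
def pvD (s : List Char) : List Char := s.flatMap (fun c => [c, pvBeatsFn c])
def pvIdxN (c : Char) : Nat := if c = 'R' then 0 else if c = 'S' then 1 else 2
def pvPopc (j : Nat) : Nat := PySem.Int.bitCount (j : Int)

theorem pvBeats_get {c : Char} (h : pvRPS c) : pvBeats.get? c = some (pvBeatsFn c) := by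
  rcases h with h | h | h <;> subst h <;> decide

theorem pvIdx_get {c : Char} (h : pvRPS c) : pvIdx.get? c = some ((pvIdxN c : Nat) : Int) := by
  rcases h with h | h | h <;> subst h <;> decide

theorem pvRPS_beats {c : Char} (h : pvRPS c) : pvRPS (pvBeatsFn c) := by
  rcases h with h | h | h <;> subst h <;> simp [pvBeatsFn, pvRPS]

theorem pvRPS_d {s : List Char} (h : ∀ c ∈ s, pvRPS c) : ∀ c ∈ pvD s, pvRPS c := by
  intro c hc
  simp only [pvD, List.mem_flatMap, List.mem_cons] at hc
  obtain ⟨a, ha, hc | hc | hc⟩ := hc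
  · exact hc ▸ h a ha
  · exact hc ▸ pvRPS_beats (h a ha)
  · cases hc

theorem pvDoubleA_fold (s acc : List Char) (h : ∀ c ∈ s, pvRPS c) :
    s.foldl
      (fun acc player => acc.bind fun nc => (pvBeats.get? player).bind fun b =>
        some (nc ++ [player, b]))
      (some acc) = some (acc ++ pvD s) := by
  induction s generalizing acc with
  | nil => simp [pvD]
  | cons c t ih =>
    have hc := h c (List.mem_cons_self ..)
    simp only [List.foldl_cons, pvBeats_get hc, Option.bind_some]
    rw [ih (acc ++ [c, pvBeatsFn c]) (fun x hx => h x (List.mem_cons_of_mem _ hx))]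
    simp [pvD]

theorem pvDoubleA_eq {s : List Char} (h : ∀ c ∈ s, pvRPS c) : pvDoubleA s = some (pvD s) := by
  simpa using pvDoubleA_fold s [] h

theorem pvLoopA_eq (k : Nat) (s : List Char) (res : List (List Char))
    (h : ∀ c ∈ s, pvRPS c) :
    pvLoopA k (s, res) = some (pvD^[k] s, res ++ (List.range k).map (fun t => pvD^[t] s)) := by
  induction k generalizing s res with
  | zero => simp [pvLoopA]
  | succ k ih =>
    simp only [pvLoopA, pvDoubleA_eq h, Option.bind_some]
    rw [ih (pvD s) (res ++ [s]) (pvRPS_d h)]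
    congr 1
    refine Prod.ext ?_ ?_
    · exact (Function.iterate_succ_apply pvD k s).symm
    · simp only [List.range_succ_eq_map, List.map_cons, List.map_map, List.append_assoc]
      simp [Function.iterate_succ_apply, Function.comp_def]

theorem pvPopc_halve (r : Nat) : pvPopc r = r % 2 + pvPopc (r / 2) := by
  rcases Nat.eq_zero_or_pos r with h | h
  · subst h; rfl
  · rw [pvPopc, pvPopc]; exact PySem.Int.bitCount_natCast h

theorem pvPopc_pow_add (i : Nat) : ∀ r : Nat, r < 2 ^ i → pvPopc (2 ^ i + r) = pvPopc r + 1 := by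
  induction i with
  | zero =>
    intro r hr
    interval_cases r
    decide
  | succ i ih =>
    intro r hr
    have hp : 2 ^ (i + 1) = 2 * 2 ^ i := by ring
    have h2 : (2 ^ (i + 1) + r) / 2 = 2 ^ i + r / 2 := by omega
    have h3 : (2 ^ (i + 1) + r) % 2 = r % 2 := by omega
    rw [pvPopc_halve (2 ^ (i + 1) + r), h2, h3, ih (r / 2) (by omega), pvPopc_halve r]
    ring

-- the beats cycle read off the 'RSP' table: order[(idx c + k) % 3] is beats applied k times
theorem pvOrder_shift (k : Nat) (c : Char) (h : pvRPS c) :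
    pvOrder.getD ((pvIdxN c + k) % 3) 'R' = pvBeatsFn^[k] c := by
  induction k with
  | zero => rcases h with h | h | h <;> subst h <;> decide
  | succ k ih =>
    rw [Function.iterate_succ_apply', ← ih]
    have hlt : (pvIdxN c + k) % 3 < 3 := Nat.mod_lt _ (by norm_num)
    have hm : (pvIdxN c + (k + 1)) % 3 = ((pvIdxN c + k) % 3 + 1) % 3 := by omega
    rw [hm]
    interval_cases h : (pvIdxN c + k) % 3 <;> decide

-- the core positional characterisation of i-fold doubling
theorem pvD_iterate (i : Nat) (s : List Char) :
    pvD^[i] s = s.flatMap (fun c => (List.range (2 ^ i)).map (fun j => pvBeatsFn^[pvPopc j] c)) := by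
  induction i generalizing s with
  | zero =>
    simp [show pvPopc 0 = 0 from rfl, List.flatMap_singleton']
  | succ i ih =>
    rw [Function.iterate_succ_apply, ih (pvD s)]
    simp only [pvD, List.flatMap_assoc]
    congr 1
    funext c
    simp only [List.flatMap_cons, List.flatMap_nil, List.append_nil]
    symm
    rw [show 2 ^ (i + 1) = 2 ^ i + 2 ^ i from by ring, List.range_add, List.map_append,
      List.map_map]
    congr 1
    refine List.map_congr_left (fun j hj => ?_)
    rw [Function.comp_apply, pvPopc_pow_add i j (List.mem_range.mp hj),
      Function.iterate_succ_apply]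

-- per-character body of B's stage, reduced to the iterate form
theorem pvStage_char (i : Int) (c : Char) (h : pvRPS c) :
    (PySem.List.pyRange 0 ((1 : Int) <<< i.toNat) 1).map
        (fun j => PySem.List.pyGetD pvOrder
          (PySem.Int.mod (((pvIdxN c : Nat) : Int) + (PySem.Int.bitCount j : Int)) 3) 'R')
      = (List.range (2 ^ i.toNat)).map (fun j => pvBeatsFn^[pvPopc j] c) := by
  have hsh : (1 : Int) <<< i.toNat = ((2 ^ i.toNat : Nat) : Int) := by
    rw [Int.shiftLeft_eq]; push_cast; ring
  rw [hsh, PySem.List.pyRange_zero_nat, List.map_map]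
  refine List.map_congr_left (fun j _ => ?_)
  have hcast : ((pvIdxN c : Nat) : Int) + (PySem.Int.bitCount ((j : Nat) : Int) : Int)
      = (((pvIdxN c + pvPopc j : Nat)) : Int) := by
    simp [pvPopc]
  simp only [Function.comp_apply, hcast]
  rw [show (3 : Int) = ((3 : Nat) : Int) from rfl, PySem.Int.mod_natCast,
    PySem.List.pyGetD_natCast]
  exact pvOrder_shift _ c h

theorem pvStageB_fold (s : List Char) (acc : List Char) (i : Int)
    (h : ∀ c ∈ s, pvRPS c) :
    s.foldl
      (fun acc c => acc.bind fun out => (pvIdx.get? c).bind fun k =>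
        some (out ++ (PySem.List.pyRange 0 ((1 : Int) <<< i.toNat) 1).map
          (fun j => PySem.List.pyGetD pvOrder (PySem.Int.mod (k + (PySem.Int.bitCount j : Int)) 3) 'R')))
      (some acc)
    = some (acc ++ s.flatMap (fun c => (List.range (2 ^ i.toNat)).map (fun j => pvBeatsFn^[pvPopc j] c))) := by
  induction s generalizing acc with
  | nil => simp
  | cons c t ih =>
    have hc := h c (List.mem_cons_self ..)
    simp only [List.foldl_cons, pvIdx_get hc, Option.bind_some]
    rw [ih _ (fun x hx => h x (List.mem_cons_of_mem _ hx))]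
    rw [pvStage_char i c hc]
    simp

theorem pvStageB_eq {s : List Char} (i : Int) (h : ∀ c ∈ s, pvRPS c) :
    pvStageB s i
      = some (s.flatMap (fun c => (List.range (2 ^ i.toNat)).map (fun j => pvBeatsFn^[pvPopc j] c))) := by
  simpa [pvStageB] using pvStageB_fold s [] i h

theorem pvAltLoop_eq (l : List Int) (w : List Char) (acc : List (List Char))
    (h : ∀ c ∈ w, pvRPS c) :
    l.foldl
      (fun acc i => acc.bind fun out => (pvStageB w i).bind fun s =>
        some (out ++ [s]))
      (some acc)
    = some (acc ++ l.map (fun i =>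
        w.flatMap (fun c => (List.range (2 ^ i.toNat)).map (fun j => pvBeatsFn^[pvPopc j] c)))) := by
  induction l generalizing acc with
  | nil => simp
  | cons i t ih =>
    simp only [List.foldl_cons, pvStageB_eq i h, Option.bind_some]
    rw [ih _]
    simp

-- ===== VERDICT (by name: the statement is the Claim_ definition above) =====
theorem build_spec : Claim_equal_build := by
  intro winner n _ hpre
  unfold Spec_build build build_alt
  by_cases hall : winner.toList.all (fun c => c == 'R' || c == 'P' || c == 'S') = true
  · -- every character is R/P/S: both sides are the staged doublings
    have hall' : ∀ c ∈ winner.toList, pvRPS c := by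
      intro c hc
      have h2 := List.all_eq_true.mp hall c hc
      simp only [Bool.or_eq_true, beq_iff_eq] at h2
      exact h2.elim (fun h => h.elim Or.inl (fun h => Or.inr (Or.inl h))) (fun h => Or.inr (Or.inr h))
    rw [pvLoopA_eq n.toNat winner.toList [] hall']
    have hmax : max n 0 + 1 - 1 = (n.toNat : Int) := by omega
    rw [PySem.List.pyRange_one, hmax]
    have htn : ((n.toNat : Int)).toNat = n.toNat := by omega
    rw [htn, pvAltLoop_eq _ winner.toList [winner.toList] hall']
    simp only [List.nil_append, List.map_map]
    rw [show (List.range n.toNat).map (fun t => pvD^[t] winner.toList) ++ [pvD^[n.toNat] winner.toList]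
        = (List.range (n.toNat + 1)).map (fun t => pvD^[t] winner.toList) from by
      rw [List.range_succ, List.map_append]; rfl]
    rw [List.range_succ_eq_map, List.map_cons, List.map_map]
    simp only [Function.iterate_zero_apply, List.cons_append, List.nil_append, List.map_cons,
      List.map_map]
    congr 1
    refine List.map_congr_left (fun t _ => ?_)
    simp only [Function.comp_apply]
    rw [pvD_iterate, show ((1 : Int) + (t : Int)).toNat = t.succ from by omega]
  · -- then Pre_build forces n ≤ 0: both sides are [winner]
    have hn : n ≤ 0 := by
      rcases hpre with hn | hall2
      · exact hn
      · exact absurd hall2 hall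
    have h0 : n.toNat = 0 := by omega
    have hm0 : max n 0 + 1 ≤ 1 := by omega
    rw [h0, PySem.List.pyRange_one_eq_nil hm0]
    simp [pvLoopA]
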